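-- pv_equiv track=rewrite | github.com/specs-feup/cacti_tests | aux_scripts/metadata_gen.py | extractRelevantBlock
-- ===== SOURCE A (Python) =====
-- def extractRelevantBlock(lines: list[str], searchString: str) -> list[str]:
--     """Looks for the first line with searchString in lines and then returns all lines after that, including that one.
--
--     Attributes:
--         lines (list[str]): the list of strings from which you want to extract the block
--         searchString (str): the string that will be used to define the line threshold
--
--     Returns:
--         list[str]: the block of relevant lines
--     """
--
--     extractedLines = []
--     foundStart = False
--
--     for line in lines:
--         if searchString in line:
--             foundStart = True
--         if foundStart:
--             extractedLines.append(line)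
--     return extractedLines
-- ===== SOURCE B (Python) =====
-- def extractRelevantBlock(lines: list[str], searchString: str) -> list[str]:
--     """Locate the first matching line, then return the tail slice from there."""
--     idx = next((i for i, line in enumerate(lines) if searchString in line), None)
--     return [] if idx is None else lines[idx:]
-- ===== Notes on version B (the rewrite author's own statement) =====
-- stated objective: simpler
-- what changed: Replaces the flag-driven per-line accumulation with locate-then-slice: find the index of the first matching line and return lines[idx:] (empty list if no match).
import Mathlib
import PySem

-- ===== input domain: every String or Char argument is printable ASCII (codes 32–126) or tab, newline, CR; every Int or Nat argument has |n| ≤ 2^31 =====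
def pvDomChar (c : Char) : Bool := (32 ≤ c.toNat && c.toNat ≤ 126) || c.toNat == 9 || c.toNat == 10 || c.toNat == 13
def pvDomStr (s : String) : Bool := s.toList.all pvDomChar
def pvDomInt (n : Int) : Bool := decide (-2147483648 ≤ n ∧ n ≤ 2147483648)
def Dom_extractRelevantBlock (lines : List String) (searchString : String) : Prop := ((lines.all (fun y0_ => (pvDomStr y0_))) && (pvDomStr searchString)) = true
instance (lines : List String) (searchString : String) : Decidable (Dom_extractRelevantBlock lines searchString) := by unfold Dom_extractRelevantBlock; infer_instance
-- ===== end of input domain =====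

-- ===== PORT A =====
-- B replaces A's flag-driven accumulation with locate-then-slice (index of first match, then lines[idx:]); return value only, no mutation.
def extractRelevantBlock (lines : List String) (searchString : String) : List String :=
  (lines.foldl
    (fun (st : List String × Bool) line =>
      let foundStart := if PySem.Str.isIn searchString line then true else st.2
      (if foundStart then st.1 ++ [line] else st.1, foundStart))
    ([], false)).1

-- ===== PORT B =====
-- next((i for i, line in enumerate(lines) if searchString in line), None) = findIdx?;
-- lines[idx:] with the nonnegative in-range idx is List.drop idx (exact here).
def extractRelevantBlock_alt (lines : List String) (searchString : String) : List String :=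
  match lines.findIdx? (fun line => PySem.Str.isIn searchString line) with
  | none => []
  | some i => lines.drop i

-- ===== PRECONDITION & SPEC =====
def Spec_extractRelevantBlock (lines : List String) (searchString : String) (out : List String) : Prop := out = extractRelevantBlock_alt lines searchString
instance (lines : List String) (searchString : String) (out : List String) : Decidable (Spec_extractRelevantBlock lines searchString out) := by unfold Spec_extractRelevantBlock; infer_instance

-- ===== CLAIM (what is proved, stated in full; the proofs are below) =====
def Claim_equal_extractRelevantBlock : Prop := ∀ (lines : List String) (searchString : String), Dom_extractRelevantBlock lines searchString → Spec_extractRelevantBlock lines searchString (extractRelevantBlock lines searchString)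

-- ===== LEMMAS AND PROOFS =====

-- once the flag is true, A's fold appends every remaining line
theorem pvFold_true (searchString : String) (lines acc : List String) :
    (lines.foldl
      (fun (st : List String × Bool) line =>
        let foundStart := if PySem.Str.isIn searchString line then true else st.2
        (if foundStart then st.1 ++ [line] else st.1, foundStart))
      (acc, true)).1 = acc ++ lines := by
  induction lines generalizing acc with
  | nil => simp
  | cons l ls ih =>
    rw [List.foldl_cons,
      show (let foundStart := if PySem.Str.isIn searchString l = true then true else ((acc, true) : List String × Bool).2
          (if foundStart = true then ((acc, true) : List String × Bool).1 ++ [l] else ((acc, true) : List String × Bool).1, foundStart))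
        = (acc ++ [l], true) from by simp, ih]
    simp

theorem pvMain (searchString : String) (lines : List String) :
    extractRelevantBlock lines searchString = extractRelevantBlock_alt lines searchString := by
  induction lines with
  | nil => rfl
  | cons l ls ih =>
    unfold extractRelevantBlock extractRelevantBlock_alt
    by_cases h : PySem.Str.isIn searchString l = true
    · simp only [List.foldl_cons, List.findIdx?_cons, h, if_true]
      simpa using pvFold_true searchString ls [l]
    · simp only [Bool.not_eq_true] at h
      simp only [List.foldl_cons, List.findIdx?_cons, h, Bool.false_eq_true, if_false]
      unfold extractRelevantBlock extractRelevantBlock_alt at ih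
      rw [ih]
      cases hf : ls.findIdx? (fun line => PySem.Str.isIn searchString line) <;> simp

-- ===== VERDICT (by name: the statement is the Claim_ definition above) =====
theorem extractRelevantBlock_spec : Claim_equal_extractRelevantBlock := by
  intro lines searchString _
  exact pvMain searchString lines
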